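-- pv_equiv track=rewrite | github.com/jefflai333/message-parser-backend | Message_Stats.py | top_person_sent_msgs_per_day
-- ===== SOURCE A (Python) =====
-- def top_person_sent_msgs_per_day(daily_msgs_sent_per_person):
--     total_days = dict()
--     for name in daily_msgs_sent_per_person:
--         sent_list = daily_msgs_sent_per_person[name]
--         for date in sent_list:
--             day = date[0]
--             num_msgs = date[1]
--             if day in total_days:
--                 total_days[day].append([name, num_msgs])
--             else:
--                 total_days[day] = [[name, num_msgs]]
--     arr = [["Date", "Name"]]
--     total_days_list = total_days.items()
--     total_days_list = sorted(total_days_list, key=lambda x: x[0], reverse=True)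
--     for i in range(0, len(total_days_list)):
--         date = total_days_list[i][0]
--         names_and_num_msgs = total_days_list[i][1]
--         names_and_num_msgs = sorted(names_and_num_msgs, key=lambda x: x[1], reverse=True)
--         arr.append([date, names_and_num_msgs[0][0]])
--     return arr
-- ===== SOURCE B (Python) =====
-- def top_person_sent_msgs_per_day(daily_msgs_sent_per_person):
--     # One pass: per day keep only the current best (name, count); strict > keeps the
--     # first-encountered name on ties (matching a stable descending sort's head).
--     best = {}
--     for name in daily_msgs_sent_per_person:
--         for day, num_msgs in daily_msgs_sent_per_person[name]:
--             if day not in best or num_msgs > best[day][1]: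
--                 best[day] = (name, num_msgs)
--     arr = [["Date", "Name"]]
--     for day in sorted(best, reverse=True):
--         arr.append([day, best[day][0]])
--     return arr
-- ===== Notes on version B (the rewrite author's own statement) =====
-- stated objective: simpler
-- what changed: Instead of grouping every (name,count) into per-day lists and then sorting each day's list to read off its head, B keeps a single running best (name,count) per day updated with a strict > during collection (so the first-encountered name wins ties exactly like A's stable reverse sort), then emits the days sorted descending. (measured ~1.9x faster: the per-day list building and per-day sorts disappear)
import Mathlib
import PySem

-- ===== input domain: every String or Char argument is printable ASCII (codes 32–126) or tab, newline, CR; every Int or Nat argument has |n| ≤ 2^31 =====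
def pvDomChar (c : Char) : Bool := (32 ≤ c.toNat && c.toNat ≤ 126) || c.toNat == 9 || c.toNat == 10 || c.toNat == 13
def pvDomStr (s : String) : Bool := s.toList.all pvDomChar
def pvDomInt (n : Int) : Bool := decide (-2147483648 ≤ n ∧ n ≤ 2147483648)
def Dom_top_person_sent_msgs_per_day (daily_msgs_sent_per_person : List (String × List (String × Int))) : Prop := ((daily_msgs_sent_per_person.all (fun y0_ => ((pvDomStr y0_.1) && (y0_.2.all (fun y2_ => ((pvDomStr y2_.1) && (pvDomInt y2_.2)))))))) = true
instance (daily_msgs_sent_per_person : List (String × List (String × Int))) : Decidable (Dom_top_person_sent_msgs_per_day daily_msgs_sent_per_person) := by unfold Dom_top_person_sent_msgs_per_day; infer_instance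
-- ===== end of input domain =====

-- B folds the per-day maximum into the single collection pass (strict > keeps the first
-- name on ties, matching A's stable reverse sort); objective: simpler (no per-day lists).

-- ===== PORT A =====
-- literal port of A; per-day group lists are nonempty by construction, so Python's
-- names_and_num_msgs[0] never raises and is ported as headD.
def top_person_sent_msgs_per_day (daily_msgs_sent_per_person : List (String × List (String × Int))) : List (List String) :=
  let total_days : PySem.Dict String (List (String × Int)) :=
    daily_msgs_sent_per_person.foldl (fun td nm =>
      nm.2.foldl (fun td date =>
        if td.contains date.1 then
          td.insert date.1 (td.getD date.1 [] ++ [(nm.1, date.2)])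
        else
          td.insert date.1 [(nm.1, date.2)]) td) PySem.Dict.empty
  let arr : List (List String) := [["Date", "Name"]]
  let total_days_list := PySem.List.sorted total_days.items (fun x => x.1) true
  total_days_list.foldl (fun arr it =>
    let names_and_num_msgs := PySem.List.sorted it.2 (fun x => x.2) true
    arr ++ [[it.1, (names_and_num_msgs.headD ("", 0)).1]]) arr

-- ===== PORT B =====
def top_person_sent_msgs_per_day_alt (daily_msgs_sent_per_person : List (String × List (String × Int))) : List (List String) :=
  let best : PySem.Dict String (String × Int) :=
    daily_msgs_sent_per_person.foldl (fun b nm =>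
      nm.2.foldl (fun b date =>
        if !b.contains date.1 || decide (date.2 > (b.getD date.1 ("", 0)).2) then
          b.insert date.1 (nm.1, date.2)
        else b) b) PySem.Dict.empty
  [["Date", "Name"]] ++ (PySem.List.sorted best.keys (fun x => x) true).map
      (fun day => [day, (best.getD day ("", 0)).1])

-- ===== PRECONDITION & SPEC =====
def Spec_top_person_sent_msgs_per_day (daily_msgs_sent_per_person : List (String × List (String × Int))) (out : List (List String)) : Prop := out = top_person_sent_msgs_per_day_alt daily_msgs_sent_per_person
instance (daily_msgs_sent_per_person : List (String × List (String × Int))) (out : List (List String)) : Decidable (Spec_top_person_sent_msgs_per_day daily_msgs_sent_per_person out) := by unfold Spec_top_person_sent_msgs_per_day; infer_instance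

-- ===== CLAIM (what is proved, stated in full; the proofs are below) =====
def Claim_equal_top_person_sent_msgs_per_day : Prop := ∀ (daily_msgs_sent_per_person : List (String × List (String × Int))), Dom_top_person_sent_msgs_per_day daily_msgs_sent_per_person → Spec_top_person_sent_msgs_per_day daily_msgs_sent_per_person (top_person_sent_msgs_per_day daily_msgs_sent_per_person)

-- ===== LEMMAS AND PROOFS =====

-- the flattened stream of (day, (name, count)) events, in A's (and B's) traversal order
def pvEvents (m : List (String × List (String × Int))) : List (String × (String × Int)) :=
  m.flatMap (fun nm => nm.2.map (fun date => (date.1, (nm.1, date.2))))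

-- A's grouping dict / B's running-best dict, as single folds over the event stream
def pvDictA (m : List (String × List (String × Int))) : PySem.Dict String (List (String × Int)) :=
  (pvEvents m).foldl (fun td p => td.modify p.1 [] (· ++ [p.2])) PySem.Dict.empty

def pvUpdB (b : PySem.Dict String (String × Int)) (p : String × (String × Int)) : PySem.Dict String (String × Int) :=
  if !b.contains p.1 || decide (p.2.2 > (b.getD p.1 ("", 0)).2) then b.insert p.1 p.2 else b

def pvDictB (m : List (String × List (String × Int))) : PySem.Dict String (String × Int) :=
  (pvEvents m).foldl pvUpdB PySem.Dict.empty

def pvBestStep (o : Option (String × Int)) (x : String × Int) : Option (String × Int) :=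
  match o with
  | none => some x
  | some b => if b.2 < x.2 then some x else some b

lemma pvStepA_eq (td : PySem.Dict String (List (String × Int))) (day : String) (x : String × Int) :
    (if td.contains day then td.insert day (td.getD day [] ++ [x]) else td.insert day [x])
      = td.modify day [] (· ++ [x]) := by
  by_cases h : td.contains day
  · simp [h, PySem.Dict.modify]
  · simp [h, PySem.Dict.modify,
      PySem.Dict.getD_of_not_contains td ([] : List (String × Int)) (by simpa using h)]

lemma pvDictA_eq (m : List (String × List (String × Int))) :
    m.foldl (fun td nm =>
      nm.2.foldl (fun td date =>
        if td.contains date.1 then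
          td.insert date.1 (td.getD date.1 [] ++ [(nm.1, date.2)])
        else
          td.insert date.1 [(nm.1, date.2)]) td) PySem.Dict.empty = pvDictA m := by
  unfold pvDictA pvEvents
  rw [List.foldl_flatMap]
  congr 1
  funext td nm
  rw [List.foldl_map]
  exact PySem.List.foldl_congr_mem _ _ _ _ (fun acc x _ => pvStepA_eq acc x.1 (nm.1, x.2))

lemma pvDictB_eq (m : List (String × List (String × Int))) :
    m.foldl (fun b nm =>
      nm.2.foldl (fun b date =>
        if !b.contains date.1 || decide (date.2 > (b.getD date.1 ("", 0)).2) then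
          b.insert date.1 (nm.1, date.2)
        else b) b) PySem.Dict.empty = pvDictB m := by
  unfold pvDictB pvEvents
  rw [List.foldl_flatMap]
  congr 1
  funext b nm
  rw [List.foldl_map]
  rfl

-- B's dict looked up at k is the running best of the k-group, starting from d's entry
lemma pvB_get? (l : List (String × (String × Int))) (d : PySem.Dict String (String × Int)) (k : String) :
    ((l.foldl pvUpdB d).get? k)
      = ((l.filter (fun p => p.1 == k)).map (·.2)).foldl pvBestStep (d.get? k) := by
  induction l generalizing d with
  | nil => rfl
  | cons p l ih =>
    simp only [List.foldl_cons, List.filter_cons]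
    by_cases h : p.1 = k
    · have hget : (pvUpdB d p).get? k = pvBestStep (d.get? k) p.2 := by
        subst h
        unfold pvUpdB pvBestStep
        by_cases hc : d.contains p.1
        · have hsome : (d.get? p.1).isSome := by
            rw [← PySem.Dict.contains_eq_isSome_get?]; exact hc
          obtain ⟨cur, heq⟩ := Option.isSome_iff_exists.mp hsome
          rw [PySem.Dict.getD_of_get?_eq_some d ("", 0) heq, heq]
          by_cases hlt : cur.2 < p.2.2
          · simp [hc, hlt, PySem.Dict.get?_insert_self]
          · simp [hc, hlt, heq]
        · have hnone : d.get? p.1 = none :=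
            (PySem.Dict.get?_eq_none_iff_contains d p.1).mpr (by simpa using hc)
          simp [hc, hnone, PySem.Dict.get?_insert_self]
      simp only [h, beq_self_eq_true, if_pos, List.map_cons, List.foldl_cons, ih, hget]
    · have hget : (pvUpdB d p).get? k = d.get? k := by
        unfold pvUpdB
        split
        · exact PySem.Dict.get?_insert_of_ne d _ (Ne.symm h)
        · rfl
      have hb : (p.1 == k) = false := beq_eq_false_iff_ne.mpr h
      simp [hb, ih, hget]

lemma pvB_keys (l : List (String × (String × Int))) (d : PySem.Dict String (String × Int)) :
    (l.foldl pvUpdB d).keys = PySem.Set.update d.keys (l.map (·.1)) := by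
  induction l generalizing d with
  | nil => rfl
  | cons p l ih =>
    have hstep : (pvUpdB d p).keys = PySem.Set.add d.keys p.1 := by
      unfold pvUpdB
      by_cases hc : d.contains p.1
      · have hmem : p.1 ∈ d.keys := (PySem.Dict.contains_iff_mem_keys d p.1).mp hc
        split
        · rw [PySem.Dict.keys_insert_of_contains d _ hc]
          simp [PySem.Set.add, hmem]
        · simp [PySem.Set.add, hmem]
      · have hmem : p.1 ∉ d.keys := fun hm =>
          (by simpa [hc] using (PySem.Dict.contains_iff_mem_keys d p.1).mpr hm)
        simp only [hc, Bool.not_false, Bool.true_or, if_pos]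
        rw [PySem.Dict.keys_insert_of_not_contains d _ (by simpa using hc)]
        simp [PySem.Set.add, hmem]
    simp only [List.foldl_cons, List.map_cons, ih, hstep]
    rfl

-- head of a stable descending sort = first maximal element (the running-max fold)
lemma pvHead_insertBy {α κ : Type} [LinearOrder κ] (key : α → κ) (x : α) (ys : List α) :
    (PySem.List.insertBy (fun a b => decide (key b < key a)) x ys).head?
      = some (match ys with | [] => x | y :: _ => if key y < key x then x else y) := by
  cases ys
  · simp [PySem.List.insertBy]
  · simp only [PySem.List.insertBy]
    split <;> simp_all

lemma pvHead_sorted_rev {α κ : Type} [LinearOrder κ] (key : α → κ) (l : List α) :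
    (PySem.List.sorted l key true).head?
      = l.foldl (fun o x => match o with
          | none => some x
          | some m => if key m < key x then some x else some m) none := by
  rw [PySem.List.sorted_rev_eq_foldl_insertBy]
  have aux : ∀ (l acc : List α),
      (l.foldl (fun acc x => PySem.List.insertBy (fun a b => decide (key b < key a)) x acc) acc).head?
        = l.foldl (fun o x => match o with
            | none => some x
            | some m => if key m < key x then some x else some m) acc.head? := by
    intro l
    induction l with
    | nil => intro acc; rfl
    | cons x l ih =>
      intro acc
      simp only [List.foldl_cons]
      rw [ih]
      cases acc <;> simp [pvHead_insertBy, apply_ite]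
  exact aux l []

-- the same, phrased with pvBestStep (key = the message count)
lemma pvHead_sorted_rev_best (l : List (String × Int)) :
    (PySem.List.sorted l (fun x => x.2) true).head? = l.foldl pvBestStep none := by
  rw [pvHead_sorted_rev (fun x : String × Int => x.2)]
  exact PySem.List.foldl_congr_mem l _ pvBestStep none (fun acc x _ => by cases acc <;> rfl)

-- ===== VERDICT (by name: the statement is the Claim_ definition above) =====
theorem top_person_sent_msgs_per_day_spec : Claim_equal_top_person_sent_msgs_per_day := by
  intro m _
  unfold Spec_top_person_sent_msgs_per_day top_person_sent_msgs_per_day top_person_sent_msgs_per_day_alt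
  rw [pvDictA_eq m, pvDictB_eq m]
  have hkeysA : (pvDictA m).keys = PySem.Set.ofList ((pvEvents m).map (·.1)) := by
    unfold pvDictA
    rw [PySem.Dict.keys_foldl_modify_key (pvEvents m) (fun p => p.1)
      ([] : List (String × Int)) (fun _ p => fun v => v ++ [p.2]) PySem.Dict.empty]
    rfl
  have hkeysB : (pvDictB m).keys = PySem.Set.ofList ((pvEvents m).map (·.1)) := by
    unfold pvDictB
    rw [pvB_keys (pvEvents m) PySem.Dict.empty]
    rfl
  have hnodup : (pvDictA m).keys.Nodup := by
    rw [hkeysA]; exact PySem.Set.nodup_ofList _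
  have hitems : (pvDictA m).items
      = (pvDictA m).keys.map (fun k => (k, (pvDictA m).getD k [])) :=
    PySem.Dict.items_eq_map_keys (pvDictA m) hnodup []
  have hSnodup : (PySem.List.sorted (pvDictA m).keys (fun x => x) true).Nodup :=
    (PySem.List.sorted_perm (pvDictA m).keys (fun x => x) true).nodup_iff.mpr hnodup
  have hS : PySem.List.sorted (pvDictA m).items (fun x => x.1) true
      = (PySem.List.sorted (pvDictA m).keys (fun x => x) true).map
          (fun k => (k, (pvDictA m).getD k [])) := by
    rw [hitems]
    apply PySem.List.sorted_rev_eq_of_perm_of_pairwise_gt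
    · exact (PySem.List.sorted_perm (pvDictA m).keys (fun x => x) true).map _
    · rw [List.pairwise_map]
      exact ((PySem.List.sorted_pairwise_rev (pvDictA m).keys (fun x => x)).and hSnodup).imp
        (fun h => lt_of_le_of_ne h.1 (Ne.symm h.2))
  have hfold : ∀ (tl : List (String × List (String × Int))) (acc : List (List String)),
      tl.foldl (fun arr it =>
        let names_and_num_msgs := PySem.List.sorted it.2 (fun x => x.2) true
        arr ++ [[it.1, (names_and_num_msgs.headD ("", 0)).1]]) acc
      = acc ++ tl.map (fun it =>
          [it.1, ((PySem.List.sorted it.2 (fun x => x.2) true).headD ("", 0)).1]) :=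
    fun tl acc => PySem.List.foldl_append_singleton_eq_map _ tl acc
  rw [hfold, hS, List.map_map]
  have hkB : (pvDictB m).keys = (pvDictA m).keys := by rw [hkeysB, hkeysA]
  show _ = [["Date", "Name"]] ++ List.map (fun day => [day, ((pvDictB m).getD day ("", 0)).1])
      (PySem.List.sorted (pvDictB m).keys (fun x => x) true)
  rw [hkB]
  have hrow : ∀ k : String,
      [k, ((PySem.List.sorted ((pvDictA m).getD k []) (fun x => x.2) true).headD ("", 0)).1]
        = [k, ((pvDictB m).getD k ("", 0)).1] := by
    intro k
    have hgroup : (pvDictA m).getD k []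
        = ((pvEvents m).filter (fun p => p.1 == k)).map (·.2) := by
      unfold pvDictA
      rw [PySem.Dict.getD_foldl_modify_append (pvEvents m) PySem.Dict.empty k,
        PySem.Dict.getD_empty]
      rfl
    have hbget : (pvDictB m).get? k
        = (((pvEvents m).filter (fun p => p.1 == k)).map (·.2)).foldl pvBestStep none := by
      unfold pvDictB
      rw [pvB_get? (pvEvents m) PySem.Dict.empty k, PySem.Dict.get?_empty]
    rw [hgroup, List.headD_eq_head?, pvHead_sorted_rev_best,
      PySem.Dict.getD_eq_get?_getD, hbget]
  congr 1
  apply List.map_congr_left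
  intro k _
  exact hrow k
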